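-- pv_equiv track=rewrite | github.com/FoolPepper/moe_dna_llm2vec | preprocess_tokenize_EOD_merged8192.py | window_token_units_gen
-- ===== SOURCE A (Python) =====
-- def window_token_units_gen(long_str, window_size):
--     buf = []
--     i = 0
--     n = len(long_str)
--     while i < n:
--         if long_str.startswith("<EOD>", i):
--             buf.append("<EOD>")
--             i += 5
--         else:
--             buf.append(long_str[i])
--             i += 1
--         if len(buf) == window_size:
--             yield ''.join(buf)
--             buf.clear()
-- ===== SOURCE B (Python) =====
-- def window_token_units_gen(long_str, window_size):
--     # Pass 1: tokenize the whole string into a flat list of units.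
--     units = []
--     i = 0
--     n = len(long_str)
--     while i < n:
--         if long_str.startswith("<EOD>", i):
--             units.append("<EOD>")
--             i += 5
--         else:
--             units.append(long_str[i])
--             i += 1
--     # Pass 2: emit every complete window by index slicing.
--     if window_size > 0:
--         for k in range(len(units) // window_size):
--             yield "".join(units[k * window_size:(k + 1) * window_size])
-- ===== Notes on version B (the rewrite author's own statement) =====
-- stated objective: alternative
-- what changed: Replaces A's interleaved accumulate-and-flush buffer with a two-pass build-full-token-list-then-index-slice windowing (guarded by window_size > 0, where A silently yields nothing).
import Mathlib
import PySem

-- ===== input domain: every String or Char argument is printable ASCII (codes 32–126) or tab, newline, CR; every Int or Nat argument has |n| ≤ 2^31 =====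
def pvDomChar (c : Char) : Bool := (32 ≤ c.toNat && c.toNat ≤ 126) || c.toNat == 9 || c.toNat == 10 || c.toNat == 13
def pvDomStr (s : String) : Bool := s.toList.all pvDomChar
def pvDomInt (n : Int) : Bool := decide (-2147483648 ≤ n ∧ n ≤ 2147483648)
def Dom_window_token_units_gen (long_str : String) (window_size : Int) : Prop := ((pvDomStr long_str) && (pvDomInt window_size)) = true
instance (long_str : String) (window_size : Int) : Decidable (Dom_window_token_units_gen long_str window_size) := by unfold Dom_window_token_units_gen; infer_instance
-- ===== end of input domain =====

-- B re-implements A as two passes (tokenize to a unit list, then slice complete windows by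
-- index) instead of A's interleaved accumulate-and-flush buffer; same cost, different shape.
-- A is a generator; the list of yielded windows is the value compared (no argument is mutated).

-- ===== PORT A =====
-- A's while loop over index i, step for step: the `startswith("<EOD>", i)` test is the
-- 5-char pattern match on the remaining characters (exact: '<EOD>' is 5 ASCII chars), and
-- `long_str[i]` is the head character, always in range since the loop guard is i < n.
-- buf/out are the accumulator and the list of yielded windows; ''.join(buf) = PySem.Str.join "" buf.
def pvAloop (window_size : Int) : List Char → List String → List String → List String
  | [], _buf, out => out
  | '<' :: 'E' :: 'O' :: 'D' :: '>' :: rest, buf, out =>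
      let buf' := buf ++ ["<EOD>"]
      if (buf'.length : Int) = window_size then
        pvAloop window_size rest [] (out ++ [PySem.Str.join "" buf'])
      else
        pvAloop window_size rest buf' out
  | c :: rest, buf, out =>
      let buf' := buf ++ [String.ofList [c]]
      if (buf'.length : Int) = window_size then
        pvAloop window_size rest [] (out ++ [PySem.Str.join "" buf'])
      else
        pvAloop window_size rest buf' out

def window_token_units_gen (long_str : String) (window_size : Int) : List String :=
  pvAloop window_size long_str.toList [] []

-- ===== PORT B =====
-- B's pass 1: the tokenizing scan, building the flat unit list.
def pvTok : List Char → List String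
  | [] => []
  | '<' :: 'E' :: 'O' :: 'D' :: '>' :: rest => "<EOD>" :: pvTok rest
  | c :: rest => String.ofList [c] :: pvTok rest

-- B's pass 2: `for k in range(len(units) // window_size)` yielding the slice
-- units[k*w:(k+1)*w] (nonnegative in-range bounds, so the slice is drop-then-take).
def window_token_units_gen_alt (long_str : String) (window_size : Int) : List String :=
  let units := pvTok long_str.toList
  if window_size > 0 then
    (List.range (units.length / window_size.toNat)).map (fun k =>
      PySem.Str.join "" ((units.drop (k * window_size.toNat)).take window_size.toNat))
  else
    []

-- ===== PRECONDITION & SPEC =====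
def Spec_window_token_units_gen (long_str : String) (window_size : Int) (out : List String) : Prop := out = window_token_units_gen_alt long_str window_size
instance (long_str : String) (window_size : Int) (out : List String) : Decidable (Spec_window_token_units_gen long_str window_size out) := by unfold Spec_window_token_units_gen; infer_instance

-- ===== CLAIM (what is proved, stated in full; the proofs are below) =====
def Claim_equal_window_token_units_gen : Prop := ∀ (long_str : String) (window_size : Int), Dom_window_token_units_gen long_str window_size → Spec_window_token_units_gen long_str window_size (window_token_units_gen long_str window_size)

-- ===== LEMMAS AND PROOFS =====

-- Canonical form of the windowing: peel one complete window of width w at a time.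
def pvWin (w : Nat) (xs : List String) : List String :=
  if _h : 0 < w ∧ w ≤ xs.length then
    PySem.Str.join "" (xs.take w) :: pvWin w (xs.drop w)
  else
    []
termination_by xs.length
decreasing_by simp; omega

-- B's range/map slicing equals the canonical peeling.
theorem pvWin_eq (w : Nat) (hw : 0 < w) (xs : List String) :
    (List.range (xs.length / w)).map (fun k =>
      PySem.Str.join "" ((xs.drop (k * w)).take w)) = pvWin w xs := by
  by_cases h : w ≤ xs.length
  · have hd : (xs.drop w).length = xs.length - w := by simp
    have hrec := pvWin_eq w hw (xs.drop w)
    have hn : xs.length / w = (xs.drop w).length / w + 1 := by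
      rw [hd, ← Nat.div_eq_sub_div hw h]
    rw [pvWin]; simp only [hw, h, and_self, dite_true]
    rw [hn, List.range_succ_eq_map, List.map_cons, List.map_map, ← hrec]
    congr 1
    · simp
    · apply List.map_congr_left
      intro k _
      simp only [Function.comp_apply, List.drop_drop]
      congr 2
      simp [Nat.succ_mul, Nat.add_comm]
  · have h0 : xs.length / w = 0 := Nat.div_eq_of_lt (by omega)
    rw [pvWin]
    simp [h0, h]
termination_by xs.length
decreasing_by simp; omega

-- A's loop invariant: with a partially filled buffer buf (|buf| < w), the loop emits
-- exactly the complete windows of buf ++ (units of the remaining characters).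
-- The tokenizer's catch-all equation, usable when the <EOD> pattern does not match.
theorem pvTok_cons (c : Char) (rest : List Char)
    (hne : ∀ (r : List Char), c = '<' → rest = 'E' :: 'O' :: 'D' :: '>' :: r → False) :
    pvTok (c :: rest) = String.ofList [c] :: pvTok rest := by
  rw [pvTok.eq_def]
  split
  · rename_i heq; exact absurd heq (by simp)
  · rename_i heq
    injection heq with h1 h2
    exact absurd (hne _ h1 h2) (by simp)
  · rename_i _ heq
    injection heq with h1 h2
    subst h1; subst h2; rfl

theorem pvAloop_eq (w : Int) (hw : 0 < w) (l : List Char) (buf out : List String)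
    (hlt : (buf.length : Int) < w) :
    pvAloop w l buf out = out ++ pvWin w.toNat (buf ++ pvTok l) := by
  revert hlt
  fun_induction pvAloop w l buf out with
  | case1 _buf out =>
      intro hlt
      rw [pvTok, pvWin]
      have : ¬ (0 < w.toNat ∧ w.toNat ≤ (_buf ++ ([] : List String)).length) := by
        simp; omega
      rw [dif_neg this]; simp
  | case2 rest buf out buf' hflush ih =>
      intro hlt
      rw [ih (by simpa using hw), pvTok]
      have hb : buf ++ "<EOD>" :: pvTok rest = buf' ++ pvTok rest := by simp [buf']
      rw [hb]
      have hlen : buf'.length = w.toNat := by omega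
      have hc : (0 < w.toNat ∧ w.toNat ≤ (buf' ++ pvTok rest).length) := by simp; omega
      conv_rhs => rw [pvWin]
      rw [dif_pos hc, ← hlen, List.take_left, List.drop_left]
      simp
  | case3 rest buf out buf' hflush ih =>
      intro hlt
      have hlb : buf'.length = buf.length + 1 := by simp [buf']
      rw [ih (by omega), pvTok]
      have hb : buf ++ "<EOD>" :: pvTok rest = buf' ++ pvTok rest := by simp [buf']
      rw [hb]
  | case4 c rest buf out hne buf' hflush ih =>
      intro hlt
      rw [ih (by simpa using hw), pvTok_cons c rest hne]
      have hb : buf ++ String.ofList [c] :: pvTok rest = buf' ++ pvTok rest := by simp [buf']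
      rw [hb]
      have hlen : buf'.length = w.toNat := by omega
      have hc : (0 < w.toNat ∧ w.toNat ≤ (buf' ++ pvTok rest).length) := by simp; omega
      conv_rhs => rw [pvWin]
      rw [dif_pos hc, ← hlen, List.take_left, List.drop_left]
      simp
  | case5 c rest buf out hne buf' hflush ih =>
      intro hlt
      have hlb : buf'.length = buf.length + 1 := by simp [buf']
      rw [ih (by omega), pvTok_cons c rest hne]
      have hb : buf ++ String.ofList [c] :: pvTok rest = buf' ++ pvTok rest := by simp [buf']
      rw [hb]

theorem pvAloop_nonpos (w : Int) (hw : w ≤ 0) (l : List Char) (buf out : List String) :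
    pvAloop w l buf out = out := by
  fun_induction pvAloop w l buf out with
  | case1 _ _ => rfl
  | case2 rest buf out buf' hflush ih => exfalso; simp [buf'] at hflush; omega
  | case3 rest buf out buf' hflush ih => exact ih
  | case4 c rest buf out hne buf' hflush ih => exfalso; simp [buf'] at hflush; omega
  | case5 c rest buf out hne buf' hflush ih => exact ih

-- ===== VERDICT (by name: the statement is the Claim_ definition above) =====
theorem window_token_units_gen_spec : Claim_equal_window_token_units_gen := by
  intro long_str window_size _hdom
  unfold Spec_window_token_units_gen window_token_units_gen window_token_units_gen_alt
  by_cases hw : 0 < window_size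
  · rw [pvAloop_eq window_size hw long_str.toList [] [] (by simpa using hw)]
    simp only [List.nil_append, if_pos hw]
    exact (pvWin_eq window_size.toNat (by omega) (pvTok long_str.toList)).symm
  · rw [pvAloop_nonpos window_size (by omega)]
    simp [hw]
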